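-- pv_equiv track=rewrite | github.com/RyuAlize/code-slicer | util.py | extract_line_number
-- ===== SOURCE A (Python) =====
-- def extract_line_number(idx, nodes):
--     while idx >= 0:
--         c_node = nodes[idx]
--         if 'location' in c_node.keys():
--             location = c_node['location']
--             if location.strip() != '':
--                 try:
--                     ln = int(location.split(':')[0])
--                     return ln
--                 except:
--                     pass
--         idx -= 1
--     return -1
-- ===== SOURCE B (Python) =====
-- def extract_line_number(idx, nodes):
--     result = -1
--     for node in nodes[:max(0, idx + 1)]:
--         loc = node.get('location')
--         if loc is not None and loc.strip() != '':
--             try: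
--                 result = int(loc.split(':')[0])
--             except ValueError:
--                 pass
--     return result
-- ===== Notes on version B (the rewrite author's own statement) =====
-- stated objective: alternative
-- what changed: Replaces the backward while-loop with index arithmetic and early return by a forward for-loop over the slice nodes[:idx+1] keeping a last-successful-parse accumulator (dict .get instead of keys-membership plus indexing).
import Mathlib
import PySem

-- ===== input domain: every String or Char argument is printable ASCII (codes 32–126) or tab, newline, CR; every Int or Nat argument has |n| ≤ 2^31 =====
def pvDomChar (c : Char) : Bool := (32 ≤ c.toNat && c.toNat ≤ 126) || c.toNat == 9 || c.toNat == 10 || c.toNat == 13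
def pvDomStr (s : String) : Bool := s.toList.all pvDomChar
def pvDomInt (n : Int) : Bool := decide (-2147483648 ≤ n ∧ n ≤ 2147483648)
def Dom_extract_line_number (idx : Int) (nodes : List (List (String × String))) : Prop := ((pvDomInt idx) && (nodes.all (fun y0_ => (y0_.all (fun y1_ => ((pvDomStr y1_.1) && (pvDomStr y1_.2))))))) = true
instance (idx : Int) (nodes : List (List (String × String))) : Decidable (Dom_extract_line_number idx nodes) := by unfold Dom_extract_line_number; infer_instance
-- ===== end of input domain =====

-- B replaces A's backward while-loop (early return on the first parsable location) by a
-- forward pass over the slice nodes[:idx+1] keeping the last successful parse; B is total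
-- where A raises IndexError (idx beyond the end of nodes).

-- ===== PORT A =====
-- the body of one iteration of A's while loop up to the 'return'/'pass' decision:
-- some ln  = 'return ln' fires, none = fall through to 'idx -= 1'
def pvChkA (c_node : List (String × String)) : Option Int :=
  if "location" ∈ (PySem.Dict.mk c_node).keys then
    let location := ((PySem.Dict.mk c_node).get? "location").getD ""
    if PySem.Str.strip location ≠ "" then
      PySem.Int.ofStr? (((PySem.Str.split? location ":").getD []).headD "")
    else none
  else none

-- A's while loop, counting idx down; fuel = idx+1 (the number of remaining iterations).
-- Outside Pre_ (idx ≥ len(nodes)) Python raises IndexError; pyGet? is none exactly there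
-- and the .getD [] default is never reached inside Pre_.
def pvLoopA (nodes : List (List (String × String))) : Nat → Int
  | 0 => -1
  | n + 1 =>
    match pvChkA ((PySem.List.pyGet? nodes (n : Int)).getD []) with
    | some ln => ln
    | none => pvLoopA nodes n

def extract_line_number (idx : Int) (nodes : List (List (String × String))) : Int :=
  pvLoopA nodes (idx + 1).toNat

-- ===== PORT B =====
-- one step of B's for loop: overwrite result on a successful guarded parse
def pvStepB (result : Int) (node : List (String × String)) : Int :=
  match (PySem.Dict.mk node).get? "location" with
  | none => result
  | some loc =>
    if PySem.Str.strip loc = "" then result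
    else
      match PySem.Int.ofStr? (((PySem.Str.split? loc ":").getD []).headD "") with
      | some v => v
      | none => result

def extract_line_number_alt (idx : Int) (nodes : List (List (String × String))) : Int :=
  (PySem.List.slice nodes (some 0) (some (max 0 (idx + 1)))).foldl pvStepB (-1)

-- ===== PRECONDITION & SPEC =====
-- Pre_ excludes exactly the inputs where A raises IndexError: idx ≥ len(nodes)
def Pre_extract_line_number (idx : Int) (nodes : List (List (String × String))) : Prop :=
  idx < (nodes.length : Int)
instance (idx : Int) (nodes : List (List (String × String))) : Decidable (Pre_extract_line_number idx nodes) := by unfold Pre_extract_line_number; infer_instance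

def pvWitness_extract_line_number : Int × (List (List (String × String))) :=
  (1, [[("location", "3:1")], [("other", "x")]])

def Spec_extract_line_number (idx : Int) (nodes : List (List (String × String))) (out : Int) : Prop := out = extract_line_number_alt idx nodes
instance (idx : Int) (nodes : List (List (String × String))) (out : Int) : Decidable (Spec_extract_line_number idx nodes out) := by unfold Spec_extract_line_number; infer_instance

-- ===== CLAIM (what is proved, stated in full; the proofs are below) =====
def Claim_equal_extract_line_number : Prop := ∀ (idx : Int) (nodes : List (List (String × String))), Dom_extract_line_number idx nodes → Pre_extract_line_number idx nodes → Spec_extract_line_number idx nodes (extract_line_number idx nodes)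

-- ===== LEMMAS AND PROOFS =====

-- A's per-node decision and B's per-node overwrite agree: pvStepB ignores its accumulator
-- exactly when pvChkA fires.
lemma pvStep_eq_chk (r : Int) (c : List (String × String)) :
    pvStepB r c = match pvChkA c with | some v => v | none => r := by
  unfold pvStepB pvChkA
  rcases h : (PySem.Dict.mk c).get? "location" with _ | loc
  · have hs0 : PySem.Str.strip "" = "" := by decide
    simp [hs0]
  · have hk : "location" ∈ (PySem.Dict.mk c).keys := by
      by_contra hk
      rw [← PySem.Dict.get?_eq_none_iff_not_mem_keys, h] at hk
      exact Option.some_ne_none loc hk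
    simp only [hk, if_pos, Option.getD_some]
    by_cases hs : PySem.Str.strip loc = ""
    · simp [hs]
    · simp only [ne_eq, hs, not_false_eq_true, if_true]
      rcases PySem.Int.ofStr? (((PySem.Str.split? loc ":").getD []).headD "") with _ | v <;> simp

-- A's countdown loop (fuel n, inspecting indices n-1 … 0) equals B's forward fold over
-- the first n nodes.
lemma pvLoop_eq_fold (nodes : List (List (String × String))) :
    ∀ n, n ≤ nodes.length → pvLoopA nodes n = (nodes.take n).foldl pvStepB (-1) := by
  intro n
  induction n with
  | zero => intro _; simp [pvLoopA]
  | succ n ih =>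
    intro hn
    have hlt : n < nodes.length := hn
    have hget : PySem.List.pyGet? nodes (n : Int) = some nodes[n] := by
      simp [PySem.List.pyGet?_natCast, List.getElem?_eq_getElem hlt]
    have htake : nodes.take (n + 1) = nodes.take n ++ [nodes[n]] := by
      rw [List.take_add_one, List.getElem?_eq_getElem hlt]; rfl
    rw [htake, List.foldl_append]
    simp only [List.foldl_cons, List.foldl_nil]
    rw [pvStep_eq_chk]
    show (match pvChkA ((PySem.List.pyGet? nodes (n : Int)).getD []) with
          | some ln => ln
          | none => pvLoopA nodes n) = _
    rw [hget, ih (Nat.le_of_lt hlt)]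
    rcases hchk : pvChkA nodes[n] with _ | v <;> simp [hchk]

-- ===== VERDICT (by name: the statement is the Claim_ definition above) =====
theorem extract_line_number_spec : Claim_equal_extract_line_number := by
  intro idx nodes _ hpre
  unfold Spec_extract_line_number extract_line_number extract_line_number_alt
  unfold Pre_extract_line_number at hpre
  by_cases hneg : idx < 0
  · have h1 : (idx + 1).toNat = 0 := by omega
    have h2 : max 0 (idx + 1) = 0 := by omega
    rw [h1, h2]
    simp [pvLoopA, PySem.List.slice_zero_start, PySem.List.slice_to]
  · have h2 : max 0 (idx + 1) = idx + 1 := by omega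
    rw [h2]
    rw [PySem.List.slice_zero_start, PySem.List.slice_to nodes (by omega : (0:Int) ≤ idx + 1)]
    exact pvLoop_eq_fold nodes (idx + 1).toNat (by omega)
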